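-- pv_equiv track=rewrite | github.com/sonakeshishyan/Secure-Password-Generator | Password_Generator.py | restrictions
-- ===== SOURCE A (Python) =====
-- def restrictions(y: str):
--     list1 = list()
--     y = y.replace(' ', '')
--     y1 = (" ").join(y)
--     y2 = y1.split()
--     for i in y2:
--         if i == 'A':
--             if "A" not in list1:
--                 list1.append("A")
--         elif i == 'B':
--             if "B" not in list1:
--                 list1.append("B")
--         else:
--             if "C" not in list1:
--                 list1.append("C")
--     return list1
-- ===== SOURCE B (Python) =====
-- def first_index(s, pred):
--     # index of the first element of s satisfying pred, or -1 if none does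
--     return next((i for i, c in enumerate(s) if pred(c)), -1)
--
-- def restrictions(y: str):
--     # Staged algorithm: strip whitespace, then run three INDEPENDENT
--     # first-occurrence searches (one per fixed category), and finally emit the
--     # categories that were found, ordered by their first-occurrence index.
--     s = [c for c in y if not c.isspace()]
--     pairs = [(first_index(s, lambda c: c == 'A'), 'A'),
--              (first_index(s, lambda c: c == 'B'), 'B'),
--              (first_index(s, lambda c: c != 'A' and c != 'B'), 'C')]
--     found = [p for p in pairs if p[0] != -1]
--     return [cat for _, cat in sorted(found, key=lambda p: p[0])]
-- ===== Notes on version B (the rewrite author's own statement) =====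
-- stated objective: alternative
-- what changed: A strips spaces, rebuilds the string space-joined, re-splits it and accumulates categories in one append-if-absent loop; B instead runs three independent first-occurrence searches, one per fixed category (A, B, other), over the whitespace-stripped characters and then sorts the found (index, category) pairs by index - there is no accumulating membership pass at all.
import Mathlib
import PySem

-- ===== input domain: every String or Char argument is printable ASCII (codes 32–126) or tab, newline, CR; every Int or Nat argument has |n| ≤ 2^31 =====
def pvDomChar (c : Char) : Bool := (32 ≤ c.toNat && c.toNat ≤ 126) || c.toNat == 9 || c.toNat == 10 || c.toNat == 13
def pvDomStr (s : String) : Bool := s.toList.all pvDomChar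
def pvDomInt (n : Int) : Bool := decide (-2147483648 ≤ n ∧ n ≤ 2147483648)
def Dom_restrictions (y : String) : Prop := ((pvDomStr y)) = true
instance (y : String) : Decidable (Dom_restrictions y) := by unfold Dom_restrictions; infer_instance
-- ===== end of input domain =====

-- B replaces A's single append-if-absent accumulation pass by a staged algorithm: three
-- independent first-occurrence searches, one per fixed category, followed by a sort of the
-- found (index, category) pairs (objective: alternative decomposition, same cost).

-- ===== PORT A =====
-- one iteration of A's `for i in y2` loop
def restrictionsStep (list1 : List String) (i : String) : List String :=
  if i = "A" then (if "A" ∈ list1 then list1 else list1 ++ ["A"])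
  else if i = "B" then (if "B" ∈ list1 then list1 else list1 ++ ["B"])
  else (if "C" ∈ list1 then list1 else list1 ++ ["C"])

def restrictions (y : String) : List String :=
  let y' := PySem.Str.replace y " " ""                                   -- y = y.replace(' ', '')
  let y1 := PySem.Str.join " " (y'.toList.map (fun c => String.ofList [c]))  -- y1 = " ".join(y)
  let y2 := PySem.Str.split₀ y1                                          -- y2 = y1.split()
  y2.foldl restrictionsStep []

-- ===== PORT B =====
-- first_index(s, pred): hand port of `next((i for i, c in enumerate(s) if pred(c)), -1)`,
-- exact: walks the list front to back with a counter and yields the first hit, else -1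
def firstIndexGo (pred : Char → Bool) : List Char → Int → Int
  | [], _ => -1
  | c :: t, i => if pred c then i else firstIndexGo pred t (i + 1)

def firstIndex (s : List Char) (pred : Char → Bool) : Int := firstIndexGo pred s 0

def restrictions_alt (y : String) : List String :=
  let s := y.toList.filter (fun c => !PySem.Chars.isspace c)             -- [c for c in y if not c.isspace()]
  let pairs := [(firstIndex s (fun c => c == 'A'), "A"),
                (firstIndex s (fun c => c == 'B'), "B"),
                (firstIndex s (fun c => c != 'A' && c != 'B'), "C")]
  let found := pairs.filter (fun p => p.1 != -1)
  (PySem.List.sorted found (fun p => p.1)).map (fun p => p.2)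

-- ===== PRECONDITION & SPEC =====
def Spec_restrictions (y : String) (out : List String) : Prop := out = restrictions_alt y
instance (y : String) (out : List String) : Decidable (Spec_restrictions y out) := by unfold Spec_restrictions; infer_instance

-- ===== CLAIM (what is proved, stated in full; the proofs are below) =====
def Claim_equal_restrictions : Prop := ∀ (y : String), Dom_restrictions y → Spec_restrictions y (restrictions y)

-- ===== LEMMAS AND PROOFS =====

-- the category of a non-whitespace character
def pvCat (c : Char) : String := if c = 'A' ∨ c = 'B' then String.ofList [c] else "C"

-- first-occurrence list of ts: the distinct elements of ts in first-occurrence order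
def pvFol : List String → List String
  | [] => []
  | t :: ts => t :: (pvFol ts).filter (· ≠ t)

lemma ofList_singleton_eq_iff (c d : Char) : String.ofList [c] = String.ofList [d] ↔ c = d := by
  constructor
  · intro h; have := congrArg String.toList h; simpa using this
  · rintro rfl; rfl

lemma step_singleton (l : List String) (c : Char) :
    restrictionsStep l (String.ofList [c]) = (if pvCat c ∈ l then l else l ++ [pvCat c]) := by
  by_cases hA : c = 'A'
  · subst hA
    show restrictionsStep l "A" = _
    simp [restrictionsStep, pvCat]
  · by_cases hB : c = 'B'
    · subst hB
      show restrictionsStep l "B" = _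
      rw [restrictionsStep, if_neg (by decide), if_pos rfl]
      simp [pvCat]
    · have h1 : ¬ (String.ofList [c] = "A") := by
        intro h; exact hA ((ofList_singleton_eq_iff c 'A').1 h)
      have h2 : ¬ (String.ofList [c] = "B") := by
        intro h; exact hB ((ofList_singleton_eq_iff c 'B').1 h)
      simp [restrictionsStep, h1, h2, pvCat, hA, hB]

lemma foldA (xs : List Char) (l : List String) :
    (xs.map (fun c => String.ofList [c])).foldl restrictionsStep l
      = (xs.map pvCat).foldl (fun l t => if t ∈ l then l else l ++ [t]) l := by
  induction xs generalizing l with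
  | nil => rfl
  | cons c cs ih => simp only [List.map_cons, List.foldl_cons, step_singleton, ih]

-- replace(' ', '') filters out the spaces
lemma goRepl (l : List Char) (fuel : Nat) (acc : List Char) (h : l.length ≤ fuel) :
    PySem.Chars.replace.go [' '] [] fuel l acc
      = acc.reverse ++ l.filter (fun c => !(c == ' ')) := by
  induction l generalizing fuel acc with
  | nil => cases fuel <;> simp [PySem.Chars.replace.go]
  | cons c t ih =>
    cases fuel with
    | zero => simp at h
    | succ f =>
      by_cases hc : c = ' '
      · subst hc
        simp only [PySem.Chars.replace.go, List.isPrefixOf, List.filter]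
        rw [if_pos (by simp)]
        simpa using ih f acc (by simpa using h)
      · simp only [PySem.Chars.replace.go, List.filter]
        rw [if_neg (by simp [List.isPrefixOf]; exact fun h' => hc h'.symm)]
        rw [ih f (c :: acc) (by simpa using h)]
        simp [show (c == ' ') = false by simp [hc]]

lemma replace_spec (y : String) :
    (PySem.Str.replace y " " "").toList = y.toList.filter (fun c => !(c == ' ')) := by
  simp only [PySem.Str.replace, PySem.Chars.replace]
  rw [if_neg (by decide)]
  simpa using goRepl y.toList y.toList.length [] le_rfl

-- split(" ".join(chars)) keeps exactly the non-whitespace chars, as singletons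
lemma goSplit (cs : List Char) (acc : List (List Char)) :
    PySem.Chars.split₀.go (PySem.Chars.join [' '] (cs.map (fun c => [c]))) [] acc
      = acc.reverse ++ (cs.filter (fun c => !PySem.Chars.isspace c)).map (fun c => [c]) := by
  induction cs generalizing acc with
  | nil => simp [PySem.Chars.join_nil, PySem.Chars.split₀.go]
  | cons c cs ih =>
    cases cs with
    | nil =>
      by_cases hc : PySem.Chars.isspace c
      · simp [PySem.Chars.join_singleton, PySem.Chars.split₀.go, hc]
      · simp [PySem.Chars.join_singleton, PySem.Chars.split₀.go, hc]
    | cons d ds =>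
      simp only [List.map_cons] at ih ⊢
      rw [PySem.Chars.join_cons_cons]
      by_cases hc : PySem.Chars.isspace c
      · have hsp : PySem.Chars.isspace ' ' = true := by decide
        simp only [List.cons_append, List.nil_append,
          PySem.Chars.split₀.go, hc, hsp, if_pos, List.isEmpty_nil]
        rw [ih acc]
        simp [hc]
      · have hsp : PySem.Chars.isspace ' ' = true := by decide
        simp only [List.cons_append, List.nil_append,
          PySem.Chars.split₀.go, hc, hsp, Bool.false_eq_true, if_false, if_pos,
          List.isEmpty_cons, List.isEmpty_nil]
        rw [List.reverse_singleton, ih ([c] :: acc)]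
        simp [hc]

lemma split_join (s : List Char) :
    PySem.Str.split₀ (PySem.Str.join " " (s.map (fun c => String.ofList [c])))
      = (s.filter (fun c => !PySem.Chars.isspace c)).map (fun c => String.ofList [c]) := by
  simp only [PySem.Str.split₀, PySem.Str.join, PySem.Chars.split₀]
  have : (List.map String.toList (s.map (fun c => String.ofList [c]))) = s.map (fun c => [c]) := by
    simp
  simp only [String.toList_ofList, this]
  have := goSplit s []
  simp only [List.reverse_nil, List.nil_append] at this
  rw [show (" ".toList) = [' '] from rfl, this]
  simp

-- the two filters (A removes ' ' first, then split drops all whitespace) coincide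
lemma filter_eq (y : String) :
    (PySem.Str.replace y " " "").toList.filter (fun c => !PySem.Chars.isspace c)
      = y.toList.filter (fun c => !PySem.Chars.isspace c) := by
  rw [replace_spec, List.filter_filter]
  apply List.filter_congr
  intro c _
  by_cases hc : c = ' '
  · subst hc; decide
  · simp [hc]

-- A's append-if-absent fold computes acc ++ (first-occurrence list minus acc)
lemma foldl_aia (ts : List String) (acc : List String) :
    ts.foldl (fun l t => if t ∈ l then l else l ++ [t]) acc
      = acc ++ (pvFol ts).filter (fun x => decide (x ∉ acc)) := by
  induction ts generalizing acc with
  | nil => simp [pvFol]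
  | cons t ts ih =>
    simp only [List.foldl_cons, pvFol, List.filter_cons]
    by_cases ht : t ∈ acc
    · rw [if_pos ht, ih acc]
      have : decide (t ∉ acc) = false := by simp [ht]
      rw [this, if_neg (by simp)]
      congr 1
      rw [List.filter_filter]
      apply List.filter_congr
      intro x _
      by_cases hx : x ∈ acc
      · simp [hx]
      · simp [hx]
        intro h; subst h; exact absurd ht hx
    · rw [if_neg ht, ih (acc ++ [t])]
      have : decide (t ∉ acc) = true := by simp [ht]
      rw [this, if_pos rfl]
      simp only [List.append_assoc, List.cons_append, List.nil_append, List.append_cancel_left_eq]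
      congr 1
      rw [List.filter_filter]
      apply List.filter_congr
      intro x _
      by_cases hx : x = t
      · simp [hx]
      · by_cases hxa : x ∈ acc <;> simp [hx, hxa]

lemma pvFol_nodup (ts : List String) : (pvFol ts).Nodup := by
  induction ts with
  | nil => simp [pvFol]
  | cons t ts ih =>
    simp only [pvFol, List.nodup_cons]
    refine ⟨fun h => ?_, ih.filter _⟩
    have := (List.mem_filter.1 h).2
    simp at this

lemma mem_pvFol (x : String) (ts : List String) : x ∈ pvFol ts ↔ x ∈ ts := by
  induction ts with
  | nil => simp [pvFol]
  | cons t ts ih =>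
    simp only [pvFol, List.mem_cons, List.mem_filter, ih]
    constructor
    · rintro (rfl | ⟨h, -⟩)
      · exact Or.inl rfl
      · exact Or.inr h
    · rintro (rfl | h)
      · exact Or.inl rfl
      · by_cases hx : x = t
        · exact Or.inl hx
        · exact Or.inr ⟨h, by simpa using hx⟩

-- pvFol ts is ordered by first-occurrence index in ts
lemma pvFol_pairwise (ts : List String) :
    (pvFol ts).Pairwise (fun a b => ts.findIdx (· == a) < ts.findIdx (· == b)) := by
  induction ts with
  | nil => simp [pvFol]
  | cons t ts ih =>
    simp only [pvFol, List.pairwise_cons]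
    constructor
    · intro b hb
      have hbt : b ≠ t := by simpa using (List.mem_filter.1 hb).2
      rw [List.findIdx_cons, List.findIdx_cons]
      simp only [show (t == b) = false from by simpa using Ne.symm hbt,
        show (t == t) = true from by simp, cond_true, cond_false]
      omega
    · refine (ih.filter _).imp_of_mem ?_
      intro a b ha hb hlt
      have hat : a ≠ t := by simpa using (List.mem_filter.1 ha).2
      have hbt : b ≠ t := by simpa using (List.mem_filter.1 hb).2
      rw [List.findIdx_cons, List.findIdx_cons]
      simp only [show (t == a) = false by simpa using Ne.symm hat,
        show (t == b) = false by simpa using Ne.symm hbt, cond_false]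
      omega

-- B's first_index, expressed through findIdx / any
lemma firstIndexGo_eq (p : Char → Bool) (cs : List Char) (n : Int) :
    firstIndexGo p cs n = if cs.any p then n + (cs.findIdx p : Int) else -1 := by
  induction cs generalizing n with
  | nil => simp [firstIndexGo]
  | cons c t ih =>
    by_cases hc : p c
    · simp [firstIndexGo, hc, List.findIdx_cons]
    · simp only [firstIndexGo, hc, Bool.false_eq_true, if_false, List.any_cons, Bool.false_or,
        List.findIdx_cons, cond_false]
      rw [ih]
      by_cases ht : t.any p
      · simp [ht]
        omega
      · simp [ht]

-- classification bridges: the boolean category tests on a char agree with equality of pvCat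
lemma pvCat_eqA (c : Char) : (pvCat c == "A") = (c == 'A') := by
  by_cases hA : c = 'A'
  · subst hA; decide
  · by_cases hB : c = 'B'
    · subst hB; decide
    · have : pvCat c = "C" := by simp [pvCat, hA, hB]
      simp [this, hA]

lemma pvCat_eqB (c : Char) : (pvCat c == "B") = (c == 'B') := by
  by_cases hA : c = 'A'
  · subst hA; decide
  · by_cases hB : c = 'B'
    · subst hB; decide
    · have : pvCat c = "C" := by simp [pvCat, hA, hB]
      simp [this, hB]

lemma pvCat_eqC (c : Char) : (pvCat c == "C") = (c != 'A' && c != 'B') := by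
  by_cases hA : c = 'A'
  · subst hA; decide
  · by_cases hB : c = 'B'
    · subst hB; decide
    · have : pvCat c = "C" := by simp [pvCat, hA, hB]
      simp [this, hA, hB]

-- every element of cs.map pvCat is one of the three categories
lemma map_pvCat_cases (cs : List Char) :
    ∀ t ∈ cs.map pvCat, t = "A" ∨ t = "B" ∨ t = "C" := by
  intro t ht
  obtain ⟨c, -, rfl⟩ := List.mem_map.1 ht
  by_cases hA : c = 'A'
  · subst hA; left; rfl
  · by_cases hB : c = 'B'
    · subst hB; right; left; rfl
    · right; right; simp [pvCat, hA, hB]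

-- findIdx over the categorised list = findIdx with the char-level test
lemma findIdx_map_pvCat (cs : List Char) (x : String) (p : Char → Bool)
    (hp : ∀ c, (pvCat c == x) = p c) :
    (cs.map pvCat).findIdx (· == x) = cs.findIdx p := by
  induction cs with
  | nil => rfl
  | cons c t ih => rw [List.map_cons, List.findIdx_cons, List.findIdx_cons, hp, ih]

lemma any_map_pvCat (cs : List Char) (x : String) (p : Char → Bool)
    (hp : ∀ c, (pvCat c == x) = p c) :
    (cs.map pvCat).any (· == x) = cs.any p := by
  induction cs with
  | nil => rfl
  | cons c t ih => simp only [List.map_cons, List.any_cons, hp, ih]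

lemma mem_iff_any (x : String) (ts : List String) : x ∈ ts ↔ ts.any (· == x) = true := by
  simp [List.any_eq_true]

-- ===== VERDICT (by name: the statement is the Claim_ definition above) =====
theorem restrictions_spec : Claim_equal_restrictions := by
  intro y _
  show restrictions y = restrictions_alt y
  -- common data
  set cs := y.toList.filter (fun c => !PySem.Chars.isspace c) with hcs
  set ts := cs.map pvCat with hts
  set key : String → Int := fun x => ((ts.findIdx (· == x) : Nat) : Int) with hkey
  have key_ne : ∀ x, (key x != -1) = true := by
    intro x
    have : (0:Int) ≤ key x := Int.natCast_nonneg _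
    simp only [bne_iff_ne, ne_eq]
    omega
  -- A = pvFol ts
  have hA : restrictions y = pvFol ts := by
    simp only [restrictions]
    rw [split_join, filter_eq, ← hcs, foldA, ← hts, foldl_aia]
    simp
  have hcases := map_pvCat_cases cs
  rw [← hts] at hcases
  -- the three first indices, as conditionals on membership in ts
  have idx : ∀ (x : String) (p : Char → Bool), (∀ c, (pvCat c == x) = p c) →
      firstIndex cs p = if x ∈ ts then key x else -1 := by
    intro x p hp
    rw [firstIndex, firstIndexGo_eq, show cs.any p = ts.any (· == x)
      from by rw [hts]; exact (any_map_pvCat cs x p hp).symm]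
    by_cases hmem : x ∈ ts
    · rw [if_pos ((mem_iff_any x ts).1 hmem), if_pos hmem, hkey]
      simp only [zero_add, Int.natCast_inj]
      rw [hts]
      exact (findIdx_map_pvCat cs x p hp).symm
    · rw [if_neg (fun h => hmem ((mem_iff_any x ts).2 h)), if_neg hmem]
  have hiA := idx "A" (fun c => c == 'A') pvCat_eqA
  have hiB := idx "B" (fun c => c == 'B') pvCat_eqB
  have hiC := idx "C" (fun c => c != 'A' && c != 'B') pvCat_eqC
  set ys : List (Int × String) := (pvFol ts).map (fun x => (key x, x)) with hys
  set pairs : List (Int × String) :=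
      [(firstIndex cs (fun c => c == 'A'), "A"),
       (firstIndex cs (fun c => c == 'B'), "B"),
       (firstIndex cs (fun c => c != 'A' && c != 'B'), "C")] with hpairs
  set found := pairs.filter (fun p => p.1 != -1) with hfound
  -- membership in found
  have mem_found : ∀ (i : Int) (x : String), ((i, x) ∈ found) ↔
      (x ∈ ts ∧ i = key x ∧ (x = "A" ∨ x = "B" ∨ x = "C")) := by
    intro i x
    rw [hfound, List.mem_filter, hpairs]
    constructor
    · rintro ⟨hm, hne⟩
      simp only [List.mem_cons, List.not_mem_nil, or_false] at hm
      rcases hm with h | h | h <;> rw [Prod.mk.injEq] at h <;>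
        obtain ⟨hi, rfl⟩ := h <;> subst hi <;> simp only at hne
      · rw [hiA] at hne ⊢
        by_cases h : "A" ∈ ts
        · exact ⟨h, by rw [if_pos h], Or.inl rfl⟩
        · rw [if_neg h] at hne; simp at hne
      · rw [hiB] at hne ⊢
        by_cases h : "B" ∈ ts
        · exact ⟨h, by rw [if_pos h], Or.inr (Or.inl rfl)⟩
        · rw [if_neg h] at hne; simp at hne
      · rw [hiC] at hne ⊢
        by_cases h : "C" ∈ ts
        · exact ⟨h, by rw [if_pos h], Or.inr (Or.inr rfl)⟩
        · rw [if_neg h] at hne; simp at hne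
    · rintro ⟨hmem, rfl, (rfl | rfl | rfl)⟩
      · refine ⟨?_, key_ne _⟩
        simp only [List.mem_cons, Prod.mk.injEq]
        exact Or.inl ⟨by rw [hiA, if_pos hmem], trivial⟩
      · refine ⟨?_, key_ne _⟩
        simp only [List.mem_cons, Prod.mk.injEq]
        exact Or.inr (Or.inl ⟨by rw [hiB, if_pos hmem], trivial⟩)
      · refine ⟨?_, key_ne _⟩
        simp only [List.mem_cons, Prod.mk.injEq]
        exact Or.inr (Or.inr (Or.inl ⟨by rw [hiC, if_pos hmem], trivial⟩))
  -- membership in ys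
  have mem_ys : ∀ (i : Int) (x : String), ((i, x) ∈ ys) ↔
      (x ∈ ts ∧ i = key x ∧ (x = "A" ∨ x = "B" ∨ x = "C")) := by
    intro i x
    rw [hys, List.mem_map]
    constructor
    · rintro ⟨x', hx', h⟩
      rw [Prod.mk.injEq] at h
      obtain ⟨rfl, rfl⟩ := h
      have hmem : x' ∈ ts := (mem_pvFol x' ts).1 hx'
      exact ⟨hmem, rfl, hcases x' hmem⟩
    · rintro ⟨hmem, rfl, -⟩
      exact ⟨x, (mem_pvFol x ts).2 hmem, rfl⟩
  -- nodup of both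
  have nodup_found : found.Nodup := by
    rw [hfound]
    apply List.Nodup.filter
    rw [hpairs]
    refine List.nodup_cons.2 ⟨?_, List.nodup_cons.2 ⟨?_, List.nodup_singleton _⟩⟩
    · simp
    · simp
  have nodup_ys : ys.Nodup := by
    rw [hys]
    exact (pvFol_nodup ts).map (fun a b h => congrArg Prod.snd h)
  -- perm and strict order, hence sorted found = ys
  have hperm : ys.Perm found := by
    refine (List.perm_ext_iff_of_nodup nodup_ys nodup_found).2 ?_
    rintro ⟨i, x⟩
    rw [mem_ys, mem_found]
  have hpw : ys.Pairwise (fun a b => a.1 < b.1) := by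
    rw [hys, List.pairwise_map]
    refine (pvFol_pairwise ts).imp ?_
    intro a b h
    simp only [hkey]
    exact_mod_cast h
  have hsorted : PySem.List.sorted found (fun p => p.1) = ys :=
    PySem.List.sorted_eq_of_perm_of_pairwise_lt _ _ _ hperm hpw
  -- assemble B
  have hB : restrictions_alt y = pvFol ts := by
    simp only [restrictions_alt]
    rw [← hcs, ← hpairs, ← hfound, hsorted, hys, List.map_map,
      show ((fun p : Int × String => p.2) ∘ fun x => (key x, x)) = id from rfl, List.map_id]
  rw [hA, hB]
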